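-- pv_equiv track=rewrite | github.com/nbridgland/Advent2023 | day12/day12.py | preprocess_string
-- ===== SOURCE A (Python) =====
-- def preprocess_string(string):
--     output_string = ''
--     k = 0
--     while k < len(string):
--         if string[k] != '.':
--             output_string = output_string + string[k]
--             k += 1
--         else:
--             if k != 0:
--                 output_string = output_string + string[k]
--             while string[k] == '.':
--                 if k == len(string) - 1:
--                     output_string = output_string[:len(output_string) - 1]
--                     return output_string
--                 k += 1
--     return output_string
-- ===== SOURCE B (Python) =====
-- def preprocess_string(string):
--     return '.'.join(part for part in string.split('.') if part)
-- ===== Notes on version B (the rewrite author's own statement) =====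
-- stated objective: idiomatic
-- what changed: Replaced A's two nested index-driven while loops with early return and trailing-character trimming by the idiomatic split('.') / drop empty parts / '.'.join token pipeline.
import Mathlib
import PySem

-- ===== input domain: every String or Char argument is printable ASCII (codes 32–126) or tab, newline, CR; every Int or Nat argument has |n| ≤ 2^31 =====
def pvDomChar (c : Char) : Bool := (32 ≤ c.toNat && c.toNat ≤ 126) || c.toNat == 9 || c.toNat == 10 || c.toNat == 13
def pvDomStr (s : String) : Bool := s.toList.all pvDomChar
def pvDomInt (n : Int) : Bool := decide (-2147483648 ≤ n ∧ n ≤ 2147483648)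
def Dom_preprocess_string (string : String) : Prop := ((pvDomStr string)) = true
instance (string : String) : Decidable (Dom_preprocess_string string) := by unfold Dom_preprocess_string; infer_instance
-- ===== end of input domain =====

-- B replaces A's two nested index-driven while loops by split('.') / drop empty parts / '.'.join (idiomatic, same O(n) cost).

-- ===== PORT A =====
-- inner 'while string[k] == '.'' loop of A: skips a dot run; when the run reaches the last
-- character it early-returns output_string[:len(output_string)-1] (= dropLast, exact for every
-- length including 0).  Sum.inl = the early return value, Sum.inr = the index after the run.
-- The fuel parameter and the two 'Sum.inr k' fallbacks are only totality guards: A keeps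
-- k < len(string) throughout, and fuel = len(string) never runs out (proved in pvInner_spec).
def pvInner (l : List Char) (out : List Char) : Nat → Nat → (List Char) ⊕ Nat
  | 0, k => Sum.inr k
  | fuel + 1, k =>
    if h : k < l.length then
      if l[k]'h = '.' then
        if k = l.length - 1 then Sum.inl out.dropLast
        else pvInner l out fuel (k + 1)
      else Sum.inr k
    else Sum.inr k

-- outer 'while k < len(string)' loop of A (fuel is again only a totality guard:
-- k strictly increases each iteration, so fuel = len(string) + 1 suffices, see pvLoop_spec)
def pvLoop (l : List Char) : Nat → List Char → Nat → List Char
  | 0, out, _ => out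
  | fuel + 1, out, k =>
    if h : k < l.length then
      if hc : l[k]'h ≠ '.' then
        pvLoop l fuel (out ++ [l[k]'h]) (k + 1)
      else
        let out' := if k ≠ 0 then out ++ [l[k]'h] else out
        match pvInner l out' l.length k with
        | Sum.inl res => res
        | Sum.inr k' => pvLoop l fuel out' k'
    else out

def preprocess_string (string : String) : String :=
  String.ofList (pvLoop string.toList (string.toList.length + 1) [] 0)

-- ===== PORT B =====
-- Source B: '.'.join(part for part in string.split('.') if part)
def preprocess_string_alt (string : String) : String :=
  String.ofList (PySem.Chars.join ['.']
    ((PySem.Chars.splitOn string.toList ['.']).filter (fun p => p ≠ [])))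

-- ===== PRECONDITION & SPEC =====
def Spec_preprocess_string (string : String) (out : String) : Prop := out = preprocess_string_alt string
instance (string : String) (out : String) : Decidable (Spec_preprocess_string string out) := by unfold Spec_preprocess_string; infer_instance

-- ===== CLAIM (what is proved, stated in full; the proofs are below) =====
def Claim_equal_preprocess_string : Prop := ∀ (string : String), Dom_preprocess_string string → Spec_preprocess_string string (preprocess_string string)

-- ===== LEMMAS AND PROOFS =====

-- structural single-char split: splitDotP l = (first '.'-free segment, remaining segments)
def splitDotP : List Char → List Char × List (List Char)
  | [] => ([], [])
  | c :: rest =>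
    let p := splitDotP rest
    if c = '.' then ([], p.1 :: p.2) else (c :: p.1, p.2)

lemma splitOn_go_spec :
    ∀ (fuel : Nat) (l cur : List Char) (accs : List (List Char)), l.length < fuel →
    PySem.Chars.splitOn.go ['.'] fuel l cur accs =
      accs.reverse ++ (cur.reverse ++ (splitDotP l).1) :: (splitDotP l).2 := by
  intro fuel
  induction fuel with
  | zero => intro l cur accs h; omega
  | succ f ih =>
    intro l cur accs h
    match l with
    | [] => rw [PySem.Chars.splitOn.go]; simp [splitDotP]; omega
    | c :: rest =>
      rw [PySem.Chars.splitOn.go]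
      by_cases hc : c = '.'
      · have hp : ['.'].isPrefixOf (c :: rest) = true := by simp [hc, List.isPrefixOf]
        rw [if_pos hp]
        simp only [List.length_cons] at h
        rw [ih _ [] _ (by simpa using by omega)]
        simp [splitDotP, hc]
      · have hp : ¬ (['.'].isPrefixOf (c :: rest) = true) := by
          simp [List.isPrefixOf]
          exact fun he => absurd he.symm hc
        rw [if_neg hp]
        simp only [List.length_cons] at h
        rw [ih _ _ _ (by omega)]
        simp [splitDotP, hc]

lemma splitOn_eq (l : List Char) :
    PySem.Chars.splitOn l ['.'] = (splitDotP l).1 :: (splitDotP l).2 := by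
  unfold PySem.Chars.splitOn
  rw [splitOn_go_spec (l.length + 1) l [] [] (by omega)]
  simp

-- A's value as a structural recursion over the suffix still to be read, for positions k ≥ 1
def gA : List Char → List Char
  | [] => []
  | c :: rest =>
    if c = '.' then
      match h : rest.dropWhile (· == '.') with
      | [] => []
      | d :: m => '.' :: gA (d :: m)
    else c :: gA rest
termination_by l => l.length
decreasing_by
  · have h1 : (rest.dropWhile (· == '.')).length ≤ rest.length := List.Sublist.length_le (List.dropWhile_sublist _)
    rw [h] at h1
    simp at h1 ⊢
    omega
  · simp

lemma pvInner_spec (l : List Char) :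
    ∀ fuel k out, l.length - k ≤ fuel → k < l.length →
      ((l.drop k).dropWhile (· == '.') = [] → pvInner l out fuel k = Sum.inl out.dropLast) ∧
      ((l.drop k).dropWhile (· == '.') ≠ [] → ∃ k', pvInner l out fuel k = Sum.inr k' ∧ k ≤ k' ∧ k' ≤ l.length ∧
        l.drop k' = (l.drop k).dropWhile (· == '.')) := by
  intro fuel
  induction fuel with
  | zero => intro k out hn hk; omega
  | succ m ih =>
    intro k out hn hk
    have hdrop : l.drop k = l[k]'hk :: l.drop (k + 1) := (List.getElem_cons_drop hk).symm
    rw [pvInner]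
    simp only [hk, dite_true]
    by_cases hc : l[k]'hk = '.'
    · simp only [hc, if_true]
      have hdw : (l.drop k).dropWhile (· == '.') = (l.drop (k + 1)).dropWhile (· == '.') := by
        rw [hdrop, hc]; simp
      by_cases hl : k = l.length - 1
      · have h1 : l.drop (k + 1) = [] := by
          apply List.drop_eq_nil_of_le; omega
        rw [if_pos hl]
        constructor
        · intro; rfl
        · intro hne; exact absurd (by rw [hdw, h1]; rfl) hne
      · simp only [hl, if_false]
        have hk1 : k + 1 < l.length := by omega
        have := ih (k + 1) out (by omega) hk1
        constructor
        · intro hne; exact this.1 (by rw [← hdw]; exact hne)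
        · intro hne
          obtain ⟨k', h1, h2, h3, h4⟩ := this.2 (by rw [← hdw]; exact hne)
          exact ⟨k', h1, by omega, h3, by rw [h4, hdw]⟩
    · simp only [hc, if_false]
      have hdw : (l.drop k).dropWhile (· == '.') = l.drop k := by
        rw [hdrop]; simp [hc]
      constructor
      · intro hne
        rw [hdw, hdrop] at hne
        simp at hne
        omega
      · intro _
        exact ⟨k, rfl, le_refl k, by omega, hdw.symm⟩

lemma pvLoop_spec (l : List Char) :
    ∀ fuel k out, l.length - k < fuel → 1 ≤ k → pvLoop l fuel out k = out ++ gA (l.drop k) := by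
  intro fuel
  induction fuel with
  | zero => intro k out hn hk1; omega
  | succ f ih =>
    intro k out hn hk1
    by_cases hk : k < l.length
    · have hdrop : l.drop k = l[k]'hk :: l.drop (k + 1) := (List.getElem_cons_drop hk).symm
      rw [pvLoop]
      simp only [hk, dite_true]
      by_cases hc : l[k]'hk = '.'
      · simp only [hc, ne_eq, not_true_eq_false, dite_false]
        have hspec := pvInner_spec l l.length k (out ++ ['.']) (by omega) hk
        have hdw : (l.drop k).dropWhile (· == '.') = (l.drop (k + 1)).dropWhile (· == '.') := by
          rw [hdrop, hc]; simp
        have hout' : (if ¬k = 0 then out ++ ['.'] else out) = out ++ ['.'] := if_pos (by omega)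
        split
        next res heq =>
          rw [hout'] at heq
          by_cases hall : (l.drop k).dropWhile (· == '.') = []
          · have h2 := (hspec.1 hall).symm.trans heq
            have hres : res = out := by
              have := Sum.inl.inj h2
              rw [← this, List.dropLast_concat]
            have hga : gA (l.drop k) = [] := by
              rw [hdrop, gA, if_pos hc, ← hdw, hall]
            rw [hres, hga, List.append_nil]
          · obtain ⟨k', hinr, _, _, _⟩ := hspec.2 hall
            rw [hinr] at heq
            simp at heq
        next k' heq =>
          rw [hout'] at heq
          by_cases hall : (l.drop k).dropWhile (· == '.') = []
          · rw [hspec.1 hall] at heq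
            simp at heq
          · obtain ⟨k'', hinr, hle, hlen, hdk'⟩ := hspec.2 hall
            have hkk : k' = k'' := Sum.inr.inj (heq.symm.trans hinr)
            subst hkk
            have hlt : k < k' := by
              have h1 : (l.drop k').length ≤ (l.drop (k + 1)).length := by
                rw [hdk', hdw]
                exact List.Sublist.length_le (List.dropWhile_sublist _)
              simp only [List.length_drop] at h1
              omega
            rw [if_pos (show ¬k = 0 by omega)]
            rw [ih k' (out ++ ['.']) (by omega) (by omega)]
            have hga : gA (l.drop k) = '.' :: gA (l.drop k') := by
              rw [hdrop, gA, if_pos hc]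
              rw [hdw] at hdk'
              cases hm : l.drop k' with
              | nil =>
                rw [hm] at hdk'
                rw [← hdw] at hdk'
                exact absurd hdk'.symm hall
              | cons d m =>
                rw [hm] at hdk'
                rw [← hdk']
            rw [hga]
            simp
      · simp only [hc, ne_eq, not_false_eq_true, dite_true]
        rw [ih (k + 1) (out ++ [l[k]'hk]) (by omega) (by omega)]
        have hga : gA (l.drop k) = l[k]'hk :: gA (l.drop (k + 1)) := by
          rw [hdrop, gA, if_neg hc]
        rw [hga]
        simp
    · rw [pvLoop]
      simp only [hk, dite_false]
      rw [List.drop_eq_nil_of_le (by omega), gA]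
      simp

lemma dropWhile_head_not (p : Char → Bool) (l m : List Char) (d : Char)
    (h : l.dropWhile p = d :: m) : p d = false := by
  have h2 : (l.dropWhile p).head? = some d := by rw [h]; rfl
  have h1 := List.head_dropWhile_not p (l := l) (by simp [h])
  have h3 : (l.dropWhile p).head (by simp [h]) = d := by
    have := List.head?_eq_some_head (l := l.dropWhile p) (by simp [h])
    rw [h2] at this; exact (Option.some.inj this).symm
  rwa [h3] at h1

lemma pvLoop_zero (l : List Char) :
    pvLoop l (l.length + 1) [] 0 = gA (l.dropWhile (· == '.')) := by
  rw [pvLoop]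
  by_cases hk : 0 < l.length
  · simp only [hk, dite_true]
    have hdecomp : l = l[0]'hk :: l.drop 1 := (List.getElem_cons_drop hk).symm
    by_cases hc : l[0]'hk = '.'
    · simp only [hc, ne_eq, not_true_eq_false, dite_false]
      have hspec := pvInner_spec l l.length 0 ([] : List Char) (by omega) hk
      simp only [List.drop_zero] at hspec
      have hdw : l.dropWhile (· == '.') = (l.drop 1).dropWhile (· == '.') := by
        conv_lhs => rw [hdecomp]
        rw [hc]; simp
      split
      next res heq =>
        rw [if_neg (show ¬False from not_false)] at heq
        by_cases hall : l.dropWhile (· == '.') = []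
        · have h2 := (hspec.1 hall).symm.trans heq
          have hres : res = [] := by
            have := Sum.inl.inj h2
            rw [← this]; rfl
          rw [hres, hall, gA]
        · obtain ⟨k', hinr, _, _, _⟩ := hspec.2 hall
          rw [hinr] at heq
          simp at heq
      next k' heq =>
        rw [if_neg (show ¬False from not_false)] at heq
        by_cases hall : l.dropWhile (· == '.') = []
        · rw [hspec.1 hall] at heq
          simp at heq
        · obtain ⟨k'', hinr, hle, hlen, hdk'⟩ := hspec.2 hall
          have hkk : k' = k'' := Sum.inr.inj (heq.symm.trans hinr)
          subst hkk
          have hlt : 0 < k' := by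
            have h1 : (l.drop k').length ≤ (l.drop 1).length := by
              rw [hdk', hdw]
              exact List.Sublist.length_le (List.dropWhile_sublist _)
            simp only [List.length_drop] at h1
            omega
          simp only [if_false]
          rw [pvLoop_spec l l.length k' [] (by omega) (by omega)]
          rw [hdk']
          rfl
    · simp only [hc, ne_eq, not_false_eq_true, dite_true]
      rw [pvLoop_spec l l.length 1 _ (by omega) (by omega)]
      have hdw : l.dropWhile (· == '.') = l := by
        conv_lhs => rw [hdecomp]
        conv_rhs => rw [hdecomp]
        simp [hc]
      rw [hdw]
      conv_rhs => rw [hdecomp]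
      rw [gA, if_neg hc]
      simp
  · simp only [hk, dite_false]
    have hl : l = [] := by
      cases l with
      | nil => rfl
      | cons a b => simp at hk
    rw [hl]
    rw [show (List.dropWhile (· == '.') ([] : List Char)) = [] from rfl, gA]

lemma filter_splitDotP_dropWhile (l : List Char) :
    ((splitDotP l).1 :: (splitDotP l).2).filter (fun p => p ≠ []) =
      ((splitDotP (l.dropWhile (· == '.'))).1 :: (splitDotP (l.dropWhile (· == '.'))).2).filter (fun p => p ≠ []) := by
  induction l with
  | nil => rfl
  | cons c rest ih =>
    by_cases hc : c = '.'
    · have h1 : (c :: rest).dropWhile (· == '.') = rest.dropWhile (· == '.') := by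
        simp [hc]
      rw [h1, ← ih]
      simp [splitDotP, hc]
    · have h1 : (c :: rest).dropWhile (· == '.') = c :: rest := by
        simp [hc]
      rw [h1]

lemma join_cons_head (c : Char) (x : List Char) (xs : List (List Char)) :
    PySem.Chars.join ['.'] ((c :: x) :: xs) = c :: PySem.Chars.join ['.'] (x :: xs) := by
  cases xs with
  | nil => rw [PySem.Chars.join_singleton, PySem.Chars.join_singleton]
  | cons y ys => rw [PySem.Chars.join_cons_cons, PySem.Chars.join_cons_cons]; simp

lemma gA_join : ∀ (n : Nat) (l : List Char), l.length = n →
    gA l = PySem.Chars.join ['.'] ((splitDotP l).1 :: (splitDotP l).2.filter (fun p => p ≠ [])) := by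
  intro n
  induction n using Nat.strong_induction_on with
  | _ n ih =>
    intro l hn
    match l with
    | [] => rw [gA]; simp [splitDotP, PySem.Chars.join_singleton]
    | c :: rest =>
      by_cases hc : c = '.'
      · rw [gA, if_pos hc]
        have hfd := filter_splitDotP_dropWhile rest
        have hsp : splitDotP (c :: rest) =
            ([], (splitDotP rest).1 :: (splitDotP rest).2) := by
          simp [splitDotP, hc]
        rw [hsp]
        cases hm : rest.dropWhile (· == '.') with
        | nil =>
          show ([] : List Char) = PySem.Chars.join ['.']
            (([] : List Char) :: ((splitDotP rest).1 :: (splitDotP rest).2).filter (fun p => p ≠ []))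
          have hthis : ((splitDotP rest).1 :: (splitDotP rest).2).filter (fun p => p ≠ []) = [] := by
            rw [hfd, hm]
            rfl
          rw [hthis, PySem.Chars.join_singleton]
        | cons d m =>
          show ('.' : Char) :: gA (d :: m) = _
          have hd : (d == '.') = false := dropWhile_head_not _ rest m d hm
          have hsp2 : splitDotP (d :: m) = (d :: (splitDotP m).1, (splitDotP m).2) := by
            simp only [splitDotP]
            rw [if_neg (by simpa using hd)]
          have hlen : (d :: m).length < n := by
            have := List.Sublist.length_le (List.dropWhile_sublist (· == '.') (l := rest))
            rw [hm] at this
            simp only [List.length_cons] at this hn ⊢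
            omega
          have hfr : ((splitDotP rest).1 :: (splitDotP rest).2).filter (fun p => p ≠ []) =
              (d :: (splitDotP m).1) :: (splitDotP m).2.filter (fun p => p ≠ []) := by
            rw [hfd, hm, hsp2]
            simp
          have hfr2 : ([] : List Char) :: ((splitDotP rest).1 :: (splitDotP rest).2).filter (fun p => p ≠ []) =
              [] :: (d :: (splitDotP m).1) :: (splitDotP m).2.filter (fun p => p ≠ []) := by rw [hfr]
          calc ('.' : Char) :: gA (d :: m)
              = PySem.Chars.join ['.'] ([] :: (d :: (splitDotP m).1) :: (splitDotP m).2.filter (fun p => p ≠ [])) := by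
                rw [PySem.Chars.join_cons_cons, ih (d :: m).length hlen (d :: m) rfl, hsp2]
                simp
            _ = PySem.Chars.join ['.'] (([] : List Char) :: ((splitDotP rest).1 :: (splitDotP rest).2).filter (fun p => p ≠ [])) := by rw [hfr2]
            _ = PySem.Chars.join ['.'] ([] :: ((splitDotP rest).1 :: (splitDotP rest).2).filter (fun p => p ≠ [])) := rfl
      · rw [gA, if_neg hc]
        have hsp : splitDotP (c :: rest) = (c :: (splitDotP rest).1, (splitDotP rest).2) := by
          simp [splitDotP, hc]
        rw [hsp]
        have hlen : rest.length < n := by simp at hn; omega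
        rw [ih rest.length hlen rest rfl]
        exact (join_cons_head c (splitDotP rest).1 _).symm

lemma main_eq (l : List Char) :
    pvLoop l (l.length + 1) [] 0 = PySem.Chars.join ['.']
      (((splitDotP l).1 :: (splitDotP l).2).filter (fun p => p ≠ [])) := by
  rw [pvLoop_zero, filter_splitDotP_dropWhile]
  cases hm : l.dropWhile (· == '.') with
  | nil => rw [gA]; rfl
  | cons d m =>
    have hd : (d == '.') = false := dropWhile_head_not _ l m d hm
    have hsp2 : splitDotP (d :: m) = (d :: (splitDotP m).1, (splitDotP m).2) := by
      simp only [splitDotP]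
      rw [if_neg (by simpa using hd)]
    rw [gA_join (d :: m).length (d :: m) rfl, hsp2]
    simp

-- ===== VERDICT (by name: the statement is the Claim_ definition above) =====
theorem preprocess_string_spec : Claim_equal_preprocess_string := by
  intro s _
  unfold Spec_preprocess_string preprocess_string preprocess_string_alt
  rw [splitOn_eq, main_eq]
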